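-- pv_equiv track=rewrite | github.com/sebhoa/capes | 2018/NancyMetz/exo_6_1.py | allocation
-- ===== SOURCE A (Python) =====
-- def smaller(l1, l2):
--     return l1[0] <= l2[0]
--
-- def insereBis(ll, li):
--     index = 0
--     while index < len(ll) and not smaller(li, ll[index]):
--         index += 1
--     ll.insert(index, li)
--
-- def traduit(l_intervalles):
--     l_instants = []
--     for index, (deb, fin) in enumerate(l_intervalles):
--         l_instants.extend([[deb, index, 0], [fin, index, 1]])
--     return l_instants
--
-- def agenda(l_evt):
--     cal = []
--     for evt in l_evt:
--         insereBis(cal, evt)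
--     return cal
--
-- def intersection_max(agenda):
--     maxi = 1
--     c = 0
--     for e in agenda:
--         c += 1 - 2*e[2]
--         if c > maxi:
--             maxi = c
--     return maxi
--
-- def nbr_optimal(l_intervalles):
--     l_instants = traduit(l_intervalles)
--     cal = agenda(l_instants)
--     return intersection_max(cal)
--
-- def plus_petit_vrai(liste):
--     i = 0
--     n = len(liste)
--     while i < n and not liste[i]:
--         i += 1
--     if i == n:
--         return -1
--     else:
--         return i
--
-- def allocation(l_intervalles):
--     l_instants = traduit(l_intervalles)
--     liste = agenda(l_instants)
--     nb_cours = len(l_intervalles)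
--     nb_salles = nbr_optimal(l_intervalles)
--     salles_dispos = [True] * nb_salles
--     alloc = [-1] * nb_cours
--     for l in liste:
--         if l[2] == 0:
--             alloc[l[1]] = plus_petit_vrai(salles_dispos)
--             salles_dispos[alloc[l[1]]] = False
--         else:
--             salles_dispos[alloc[l[1]]] = True
--     return alloc
-- ===== SOURCE B (Python) =====
-- def allocation(l_intervalles):
--     # Build both events per course with a sort key (time, -generation_index) that
--     # reproduces the insertion order of the original (ties: later-generated first),
--     # then one O(n log n) sort + two linear sweeps instead of the O(n^2) insertion sort.
--     events = []
--     for i, (deb, fin) in enumerate(l_intervalles):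
--         events.append((deb, -2 * i, i, 0))
--         events.append((fin, -2 * i - 1, i, 1))
--     events.sort(key=lambda e: (e[0], e[1]))
--     nb_salles = 1
--     c = 0
--     for _, _, _, kind in events:
--         c += 1 if kind == 0 else -1
--         if c > nb_salles:
--             nb_salles = c
--     free = [True] * nb_salles
--     alloc = [-1] * len(l_intervalles)
--     for _, _, i, kind in events:
--         if kind == 0:
--             r = free.index(True) if True in free else -1
--             alloc[i] = r
--             free[r] = False
--         else:
--             free[alloc[i]] = True
--     return alloc
-- ===== Notes on version B (the rewrite author's own statement) =====
-- stated objective: faster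
-- what changed: Replaces A's quadratic insertion sort of events (insereBis/agenda, rebuilt twice via nbr_optimal) by one O(n log n) built-in sort on tuples whose key (time, -generation_index) reproduces A's tie order, followed by two linear sweeps.
import Mathlib
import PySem

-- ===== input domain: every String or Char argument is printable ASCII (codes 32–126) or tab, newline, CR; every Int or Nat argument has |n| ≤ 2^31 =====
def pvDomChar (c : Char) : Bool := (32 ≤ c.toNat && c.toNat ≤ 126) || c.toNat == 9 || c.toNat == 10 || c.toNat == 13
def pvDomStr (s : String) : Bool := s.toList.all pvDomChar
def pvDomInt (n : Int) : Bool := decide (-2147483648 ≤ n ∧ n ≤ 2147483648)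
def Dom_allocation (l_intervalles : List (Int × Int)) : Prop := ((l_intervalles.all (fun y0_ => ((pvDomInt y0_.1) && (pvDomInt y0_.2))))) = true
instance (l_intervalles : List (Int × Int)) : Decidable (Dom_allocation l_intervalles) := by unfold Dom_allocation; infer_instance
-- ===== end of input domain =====

-- B replaces A's quadratic insertion sort of the event list (rebuilt twice) by one
-- O(n log n) sort with a key reproducing A's tie order, plus two linear sweeps. (objective: faster)

-- ===== PORT A =====
def smallerA (l1 l2 : Int × Int × Int) : Bool := decide (l1.1 ≤ l2.1)

def insereBisA (ll : List (Int × Int × Int)) (li : Int × Int × Int) : List (Int × Int × Int) :=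
  match ll with
  | [] => [li]
  | y :: ys => if smallerA li y then li :: y :: ys else y :: insereBisA ys li

def traduitA (l : List (Int × Int)) : List (Int × Int × Int) :=
  (PySem.List.enumerate l).foldl
    (fun acc p => acc ++ [(p.2.1, p.1, 0), (p.2.2, p.1, 1)]) []

def agendaA (l_evt : List (Int × Int × Int)) : List (Int × Int × Int) :=
  l_evt.foldl (fun cal evt => insereBisA cal evt) []

def intersectionMaxA (ag : List (Int × Int × Int)) : Int :=
  (ag.foldl (fun (s : Int × Int) e =>
    let c := s.2 + (1 - 2 * e.2.2)
    (if c > s.1 then c else s.1, c)) (1, 0)).1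

def nbrOptimalA (l : List (Int × Int)) : Int := intersectionMaxA (agendaA (traduitA l))

def ppvGoA : List Bool → Int → Int
  | [], _ => -1
  | b :: r, i => if b then i else ppvGoA r (i + 1)

def plusPetitVraiA (liste : List Bool) : Int := ppvGoA liste 0

-- one iteration of A's allocation loop; indices computed by the loop are always
-- in range, so the total pySetD/pyGetD forms are exact here
def allocStepA (s : List Bool × List Int) (e : Int × Int × Int) : List Bool × List Int :=
  if e.2.2 == 0 then
    let alloc' := PySem.List.pySetD s.2 e.2.1 (plusPetitVraiA s.1)
    (PySem.List.pySetD s.1 (PySem.List.pyGetD alloc' e.2.1 0) false, alloc')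
  else
    (PySem.List.pySetD s.1 (PySem.List.pyGetD s.2 e.2.1 0) true, s.2)

def allocation (l_intervalles : List (Int × Int)) : List Int :=
  ((agendaA (traduitA l_intervalles)).foldl allocStepA
    (List.replicate (nbrOptimalA l_intervalles).toNat true,
     List.replicate l_intervalles.length (-1))).2

-- ===== PORT B =====
def eventsB (l : List (Int × Int)) : List (Int × Int × Int × Int) :=
  (PySem.List.enumerate l).foldl
    (fun acc p => acc ++ [(p.2.1, -2 * p.1, p.1, 0), (p.2.2, -2 * p.1 - 1, p.1, 1)]) []

def allocStepB (s : List Bool × List Int) (e : Int × Int × Int × Int) : List Bool × List Int :=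
  if e.2.2.2 == 0 then
    let r : Int := if s.1.contains true then (s.1.idxOf true : Int) else -1
    (PySem.List.pySetD s.1 r false, PySem.List.pySetD s.2 e.2.2.1 r)
  else
    (PySem.List.pySetD s.1 (PySem.List.pyGetD s.2 e.2.2.1 0) true, s.2)

def sortedEventsB (l : List (Int × Int)) : List (Int × Int × Int × Int) :=
  PySem.List.sorted2 (eventsB l) (fun e => e.1) (fun e => e.2.1)

def nbSallesB (l : List (Int × Int)) : Int :=
  ((sortedEventsB l).foldl (fun (s : Int × Int) e =>
    let c := s.2 + (if e.2.2.2 == 0 then 1 else -1)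
    (if c > s.1 then c else s.1, c)) (1, 0)).1

def allocation_alt (l_intervalles : List (Int × Int)) : List Int :=
  ((sortedEventsB l_intervalles).foldl allocStepB
    (List.replicate (nbSallesB l_intervalles).toNat true,
     List.replicate l_intervalles.length (-1))).2

-- ===== PRECONDITION & SPEC =====
def Spec_allocation (l_intervalles : List (Int × Int)) (out : List Int) : Prop := out = allocation_alt l_intervalles
instance (l_intervalles : List (Int × Int)) (out : List Int) : Decidable (Spec_allocation l_intervalles out) := by unfold Spec_allocation; infer_instance

-- ===== CLAIM (what is proved, stated in full; the proofs are below) =====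
def Claim_equal_allocation : Prop := ∀ (l_intervalles : List (Int × Int)), Dom_allocation l_intervalles → Spec_allocation l_intervalles (allocation l_intervalles)

-- ===== LEMMAS AND PROOFS =====

-- projection of B's 4-tuple events (time, sortkey, course, kind) to A's triples
def projE (e : Int × Int × Int × Int) : Int × Int × Int := (e.1, e.2.2.1, e.2.2.2)

-- structural description of B's event list, starting at course index s
def evP (s : Int) : List (Int × Int) → List (Int × Int × Int × Int)
  | [] => []
  | (d, f) :: r => (d, -2 * s, s, 0) :: (f, -2 * s - 1, s, 1) :: evP (s + 1) r

lemma evB_go (l : List (Int × Int)) : ∀ (s : Int) (acc : List (Int × Int × Int × Int)),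
    (PySem.List.enumerate l s).foldl
      (fun acc p => acc ++ [(p.2.1, -2 * p.1, p.1, 0), (p.2.2, -2 * p.1 - 1, p.1, 1)]) acc
      = acc ++ evP s l := by
  induction l with
  | nil => intro s acc; simp only [PySem.List.enumerate_nil, List.foldl_nil, evP, List.append_nil]
  | cons x r ih =>
      intro s acc
      cases x with
      | mk d f =>
        simp only [PySem.List.enumerate_cons, List.foldl_cons, evP, ih]
        simp

lemma eventsB_eq_evP (l : List (Int × Int)) : eventsB l = evP 0 l := by
  unfold eventsB
  simpa using evB_go l 0 []

lemma trA_go (l : List (Int × Int)) : ∀ (s : Int) (acc : List (Int × Int × Int)),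
    (PySem.List.enumerate l s).foldl
      (fun acc p => acc ++ [(p.2.1, p.1, 0), (p.2.2, p.1, 1)]) acc
      = acc ++ (evP s l).map projE := by
  induction l with
  | nil => intro s acc; simp only [PySem.List.enumerate_nil, List.foldl_nil, evP, List.map_nil, List.append_nil]
  | cons x r ih =>
      intro s acc
      cases x with
      | mk d f =>
        simp only [PySem.List.enumerate_cons, List.foldl_cons, evP, List.map_cons, ih, projE]
        simp

lemma traduitA_eq_map (l : List (Int × Int)) : traduitA l = (evP 0 l).map projE := by
  unfold traduitA
  simpa using trA_go l 0 []

lemma evP_mem {l : List (Int × Int)} : ∀ {s : Int} {e : Int × Int × Int × Int},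
    e ∈ evP s l →
    (e.2.2.2 = 0 ∨ e.2.2.2 = 1) ∧ s ≤ e.2.2.1 ∧ e.2.2.1 < s + l.length ∧ e.2.1 ≤ -2 * s := by
  induction l with
  | nil => intro s e h; simp [evP] at h
  | cons x r ih =>
      intro s e h
      cases x with
      | mk d f =>
        simp only [evP, List.mem_cons] at h
        rcases h with h | h | h
        · subst h; refine ⟨Or.inl rfl, le_refl _, by simp, by simp⟩
        · subst h; refine ⟨Or.inr rfl, le_refl _, by simp, by simp⟩
        · obtain ⟨hk, h1, h2, h3⟩ := ih h
          refine ⟨hk, by omega, by simp at h2 ⊢; omega, by omega⟩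

lemma evP_pairwise (l : List (Int × Int)) : ∀ s : Int,
    (evP s l).Pairwise (fun a b => b.2.1 < a.2.1) := by
  induction l with
  | nil => intro s; simp [evP]
  | cons x r ih =>
      intro s
      cases x with
      | mk d f =>
        refine List.Pairwise.cons ?_ (List.Pairwise.cons ?_ (ih (s + 1)))
        · intro b hb
          rcases List.mem_cons.1 hb with h | h
          · subst h; simp; try omega
          · have := (evP_mem h).2.2.2; simp at this ⊢; try omega
        · intro b hb
          have := (evP_mem hb).2.2.2; simp at this ⊢; try omega

-- the comparator sorted2 uses with keys e.1 and e.2.1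
def ltB (a b : Int × Int × Int × Int) : Bool :=
  decide (a.1 < b.1) || (!decide (b.1 < a.1) && decide (a.2.1 < b.2.1))

lemma sorted2_eq_foldl (E : List (Int × Int × Int × Int)) :
    PySem.List.sorted2 E (fun e => e.1) (fun e => e.2.1)
      = E.foldl (fun acc x => PySem.List.insertBy ltB x acc) [] := rfl

lemma ins_eq (e : Int × Int × Int × Int) :
    ∀ cal : List (Int × Int × Int × Int), (∀ x ∈ cal, e.2.1 < x.2.1) →
    insereBisA (cal.map projE) (projE e) = (PySem.List.insertBy ltB e cal).map projE := by
  intro cal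
  induction cal with
  | nil => intro _; simp [insereBisA, PySem.List.insertBy]
  | cons y ys ih =>
      intro h
      have hy : e.2.1 < y.2.1 := h y (by simp)
      have hc : smallerA (projE e) (projE y) = ltB e y := by
        simp only [smallerA, ltB, projE, hy, decide_true]
        rcases lt_trichotomy e.1 y.1 with hlt | heq | hgt
        · simp [hlt, le_of_lt hlt, not_lt.2 (le_of_lt hlt)]
        · simp [heq]
        · simp [not_le.2 hgt, not_lt.2 (le_of_lt hgt), hgt]
      have hrec := ih (fun x hx => h x (by simp [hx]))
      simp only [List.map_cons, insereBisA, PySem.List.insertBy, hc, hrec]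
      cases ltB e y <;> simp

lemma agenda_fold :
    ∀ (E cal : List (Int × Int × Int × Int)),
    E.Pairwise (fun a b => b.2.1 < a.2.1) →
    (∀ x ∈ cal, ∀ e' ∈ E, e'.2.1 < x.2.1) →
    (E.map projE).foldl insereBisA (cal.map projE)
      = (E.foldl (fun acc x => PySem.List.insertBy ltB x acc) cal).map projE := by
  intro E
  induction E with
  | nil => intro cal _ _; simp
  | cons e E' ih =>
      intro cal hp hc
      simp only [List.map_cons, List.foldl_cons]
      rw [ins_eq e cal (fun x hx => hc x hx e (by simp))]
      apply ih _ (List.Pairwise.of_cons hp)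
      intro x hx e' he'
      rcases ((PySem.List.mem_insertBy _ _ _ _).1 hx) with hxe | hxc
      · subst hxe
        exact (List.pairwise_cons.1 hp).1 e' he'
      · exact hc x hxc e' (by simp [he'])

lemma ppvGo_eq (bs : List Bool) : ∀ i : Int,
    ppvGoA bs i = if bs.contains true then i + (bs.idxOf true : Int) else -1 := by
  induction bs with
  | nil => intro i; simp [ppvGoA]
  | cons b r ih =>
      intro i
      cases b
      · have h0 : ppvGoA (false :: r) i = ppvGoA r (i + 1) := rfl
        have hidx : List.idxOf true (false :: r) = List.idxOf true r + 1 := by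
          simp
        rw [h0, ih]
        by_cases hr : true ∈ r
        · simp [hr, hidx]; omega
        · simp [hr]
      · simp [ppvGoA]

lemma liste_eq (l : List (Int × Int)) :
    agendaA (traduitA l)
      = (PySem.List.sorted2 (eventsB l) (fun e => e.1) (fun e => e.2.1)).map projE := by
  rw [sorted2_eq_foldl, eventsB_eq_evP, traduitA_eq_map]
  unfold agendaA
  simpa using agenda_fold (evP 0 l) [] (evP_pairwise l 0) (by simp)

lemma mem_sorted_events {l : List (Int × Int)} {e : Int × Int × Int × Int}
    (h : e ∈ PySem.List.sorted2 (eventsB l) (fun e => e.1) (fun e => e.2.1)) :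
    (e.2.2.2 = 0 ∨ e.2.2.2 = 1) ∧ 0 ≤ e.2.2.1 ∧ e.2.2.1 < (l.length : Int) := by
  have hm : e ∈ eventsB l := (PySem.List.sorted2_perm _ _ _ _).mem_iff.1 h
  rw [eventsB_eq_evP] at hm
  obtain ⟨hk, h0, h1, _⟩ := evP_mem hm
  exact ⟨hk, h0, by simpa using h1⟩

lemma nb_eq (l : List (Int × Int)) : nbrOptimalA l = nbSallesB l := by
  unfold nbrOptimalA intersectionMaxA nbSallesB sortedEventsB
  rw [liste_eq, List.foldl_map]
  congr 1
  apply PySem.List.foldl_congr_mem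
  intro acc x hx
  rcases (mem_sorted_events hx).1 with hk | hk <;>
    simp [projE, hk]

lemma plusPetitVrai_eq (bs : List Bool) :
    plusPetitVraiA bs = if bs.contains true then (bs.idxOf true : Int) else -1 := by
  unfold plusPetitVraiA
  rw [ppvGo_eq]
  by_cases h : true ∈ bs <;> simp [h]

lemma pyGetD_pySetD_self (xs : List Int) (i v : Int)
    (h0 : 0 ≤ i) (h1 : i < (xs.length : Int)) :
    PySem.List.pyGetD (PySem.List.pySetD xs i v) i 0 = v := by
  lift i to ℕ using h0 with n
  have hn : n < xs.length := by exact_mod_cast h1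
  simp [hn]

lemma step_eq (e : Int × Int × Int × Int) (s : List Bool × List Int)
    (hk : e.2.2.2 = 0 ∨ e.2.2.2 = 1) (h0 : 0 ≤ e.2.2.1) (h1 : e.2.2.1 < (s.2.length : Int)) :
    allocStepA s (projE e) = allocStepB s e := by
  rcases hk with hk | hk
  · have hget : ∀ v : Int, PySem.List.pyGetD
        (PySem.List.pySetD s.2 e.2.2.1 v) e.2.2.1 0 = v :=
      fun v => pyGetD_pySetD_self s.2 e.2.2.1 v h0 h1
    simp only [allocStepA, allocStepB, projE, hk, plusPetitVrai_eq, hget]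
  · simp [allocStepA, allocStepB, projE, hk]

lemma lenStepB (s : List Bool × List Int) (e : Int × Int × Int × Int) :
    (allocStepB s e).2.length = s.2.length := by
  unfold allocStepB
  cases e.2.2.2 == 0 <;> simp [PySem.List.length_pySetD]

lemma sweep_eq :
    ∀ (E : List (Int × Int × Int × Int)) (s : List Bool × List Int),
    (∀ e ∈ E, (e.2.2.2 = 0 ∨ e.2.2.2 = 1) ∧ 0 ≤ e.2.2.1 ∧ e.2.2.1 < (s.2.length : Int)) →
    E.foldl (fun st e => allocStepA st (projE e)) s = E.foldl allocStepB s := by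
  intro E
  induction E with
  | nil => intro s _; rfl
  | cons e E' ih =>
      intro s h
      obtain ⟨hk, h0, h1⟩ := h e (by simp)
      rw [List.foldl_cons, List.foldl_cons, step_eq e s hk h0 h1]
      apply ih
      intro e' he'
      have := h e' (by simp [he'])
      simpa [lenStepB] using this

-- ===== VERDICT (by name: the statement is the Claim_ definition above) =====
theorem allocation_spec : Claim_equal_allocation := by
  intro l _
  unfold Spec_allocation allocation allocation_alt
  rw [nb_eq, liste_eq, List.foldl_map]
  unfold sortedEventsB
  congr 1
  apply sweep_eq
  intro e he
  have := mem_sorted_events he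
  simpa using this
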